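-- pv_equiv track=rewrite | github.com/wsylt/OCRSys | server/segmentation.py | dullkiller
-- ===== SOURCE A (Python) =====
-- def dullkiller(l):
--     while 1:
--         try:
--             l.remove("")
--         except ValueError:
--             return l
--         else:
--             pass
-- ===== SOURCE B (Python) =====
-- def dullkiller(l):
--     # Single-pass in-place two-pointer compaction; mutates and returns the same list object, like A.
--     w = 0
--     for r in range(len(l)):
--         if l[r] != "":
--             l[w] = l[r]
--             w += 1
--     del l[w:]
--     return l
-- ===== Notes on version B (the rewrite author's own statement) =====
-- stated objective: alternative
-- what changed: Replaces the repeated list.remove('') loop with a single-pass in-place two-pointer compaction followed by one tail deletion; avoids A's quadratic worst case but is not measurably faster on typical inputs.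
import Mathlib
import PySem

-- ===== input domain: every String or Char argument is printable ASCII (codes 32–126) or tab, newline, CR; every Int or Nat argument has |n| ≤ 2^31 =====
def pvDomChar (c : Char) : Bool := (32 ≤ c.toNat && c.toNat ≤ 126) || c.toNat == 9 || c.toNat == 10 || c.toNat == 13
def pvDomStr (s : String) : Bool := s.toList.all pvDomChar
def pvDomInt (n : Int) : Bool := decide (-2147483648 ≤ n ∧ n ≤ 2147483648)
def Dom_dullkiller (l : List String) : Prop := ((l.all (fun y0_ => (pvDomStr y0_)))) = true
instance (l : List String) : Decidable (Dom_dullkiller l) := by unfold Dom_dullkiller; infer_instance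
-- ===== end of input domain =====

-- B replaces A's repeated remove("") loop with a single-pass two-pointer compaction (alternative algorithm).
-- Both Pythons mutate l in place and return it; the theorems here are about the return value.

-- ===== PORT A =====
-- A: loop `l.remove("")` until ValueError (i.e. "" no longer present), then return l.
def dullkiller (l : List String) : List String :=
  match h : PySem.List.remove? l "" with
  | some l' => dullkiller l'
  | none => l
termination_by l.length
decreasing_by
  have hm : "" ∈ l := by
    by_contra hn
    rw [(PySem.List.remove?_eq_none_iff l "").mpr hn] at h
    simp at h
  have he := PySem.List.remove?_eq_some_erase l "" hm
  rw [he] at h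
  cases h
  rw [List.length_erase_of_mem hm]
  have := List.length_pos_of_mem hm
  omega

-- ===== PORT B =====
-- B: one pass with a write pointer; in Lean the compacted prefix l[0:w] is the accumulator.
def dullkiller_alt (l : List String) : List String :=
  l.foldl (fun acc x => if x ≠ "" then acc ++ [x] else acc) []

-- ===== PRECONDITION & SPEC =====
def Spec_dullkiller (l : List String) (out : List String) : Prop := out = dullkiller_alt l
instance (l : List String) (out : List String) : Decidable (Spec_dullkiller l out) := by unfold Spec_dullkiller; infer_instance

-- ===== CLAIM (what is proved, stated in full; the proofs are below) =====
def Claim_equal_dullkiller : Prop := ∀ (l : List String), Dom_dullkiller l → Spec_dullkiller l (dullkiller l)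

-- ===== LEMMAS AND PROOFS =====

-- B's compaction extends its accumulator with the non-empty elements, i.e. with the filter.
theorem dullkiller_alt_acc (l acc : List String) :
    l.foldl (fun acc x => if x ≠ "" then acc ++ [x] else acc) acc
      = acc ++ l.filter (fun x => x ≠ "") := by
  induction l generalizing acc with
  | nil => simp
  | cons x xs ih =>
    by_cases hx : x = ""
    · simp only [List.foldl_cons, List.filter_cons, hx]
      have := ih acc
      simp at this ⊢
      exact this
    · simp only [List.foldl_cons, List.filter_cons]
      rw [if_pos hx, ih (acc ++ [x])]
      simp [hx]

theorem dullkiller_alt_eq_filter (l : List String) :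
    dullkiller_alt l = l.filter (fun x => x ≠ "") := by
  rw [dullkiller_alt, dullkiller_alt_acc, List.nil_append]

-- Erasing one "" does not change the list of non-empty elements.
theorem filter_erase_empty (l : List String) :
    (l.erase "").filter (fun x => x ≠ "") = l.filter (fun x => x ≠ "") := by
  induction l with
  | nil => rfl
  | cons x xs ih =>
    by_cases hx : x = ""
    · subst hx; simp
    · rw [List.erase_cons_tail (by simpa using hx)]
      simp only [List.filter_cons]
      rw [if_pos (by simpa using hx), if_pos (by simpa using hx), ih]

-- A's remove-until-ValueError loop computes the filter of the non-empty elements.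
theorem dullkiller_eq_filter (l : List String) :
    dullkiller l = l.filter (fun x => x ≠ "") := by
  induction l using (measure List.length).wf.induction with
  | _ l ih =>
    rw [dullkiller]
    split
    case _ l' h =>
      have hm : "" ∈ l := by
        by_contra hn
        rw [(PySem.List.remove?_eq_none_iff l "").mpr hn] at h
        simp at h
      have he : l' = l.erase "" := by
        have := PySem.List.remove?_eq_some_erase l "" hm
        rw [this] at h
        exact (Option.some.inj h).symm
      have hlt : l'.length < l.length := by
        rw [he, List.length_erase_of_mem hm]
        have := List.length_pos_of_mem hm
        omega
      rw [ih l' hlt, he, filter_erase_empty]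
    case _ h =>
      have hn : "" ∉ l := (PySem.List.remove?_eq_none_iff l "").mp h
      rw [List.filter_eq_self.mpr]
      intro a ha
      simp only [decide_eq_true_eq]
      exact fun he => hn (he ▸ ha)

-- ===== VERDICT (by name: the statement is the Claim_ definition above) =====
theorem dullkiller_spec : Claim_equal_dullkiller := by
  intro l _
  unfold Spec_dullkiller
  rw [dullkiller_eq_filter, dullkiller_alt_eq_filter]
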